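-- pv_equiv track=rewrite | github.com/mrhappyasthma/IsThisStockGood | app/Controller.py | jsonpToCSV
-- ===== SOURCE A (Python) =====
-- def jsonpToCSV(s):
--   arr = []
--   ignore = False
--   printing = False
--   s = s.replace(',', '')
--   s = s.replace('\/', '/')
--   s = s.replace('&amp', '&')
--   s = s.replace('&nbsp;', ' ')
--   s = s.replace('</tr>', '\n')
--   for c in s:
--     if c == '<':
--       ignore = True
--       printing = False
--       continue
--     elif c == '>':
--       ignore = False
--       printing = False
--       continue
--     elif not ignore:
--       if not printing:
--         printing = True
--         arr.append(',')
--       arr.append(c)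
--   output = ''.join(arr)
--   output = output.replace('\n,', '\n')
--   output = output.replace(',\n', '\n')
--   output = output.replace(' ,', ' ')
--   output = output.replace('&mdash;', '')
--   return output[1:] if output[0] == ',' else output
-- ===== SOURCE B (Python) =====
-- def jsonpToCSV(s):
--   # Strip tags by splitting: text between a '>' (or the string start) and the
--   # next '<' or '>' is outside any tag; everything else is ignored.
--   s = s.replace(',', '').replace('\/', '/').replace('&amp', '&') \
--        .replace('&nbsp;', ' ').replace('</tr>', '\n')
--   runs = (seg.split('<')[0] for seg in s.split('>'))
--   output = ''.join(',' + r for r in runs if r)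
--   output = output.replace('\n,', '\n').replace(',\n', '\n') \
--                  .replace(' ,', ' ').replace('&mdash;', '')
--   return output[1:] if output[0] == ',' else output
-- ===== Notes on version B (the rewrite author's own statement) =====
-- stated objective: idiomatic
-- what changed: Replaces A's character-by-character ignore/printing state machine with split-based text extraction: split the cleaned string on '>', keep each piece's prefix before '<' as an outside-tag text run, and join the nonempty runs with leading commas; the split/join work runs in C instead of a per-character Python loop.
import Mathlib
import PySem

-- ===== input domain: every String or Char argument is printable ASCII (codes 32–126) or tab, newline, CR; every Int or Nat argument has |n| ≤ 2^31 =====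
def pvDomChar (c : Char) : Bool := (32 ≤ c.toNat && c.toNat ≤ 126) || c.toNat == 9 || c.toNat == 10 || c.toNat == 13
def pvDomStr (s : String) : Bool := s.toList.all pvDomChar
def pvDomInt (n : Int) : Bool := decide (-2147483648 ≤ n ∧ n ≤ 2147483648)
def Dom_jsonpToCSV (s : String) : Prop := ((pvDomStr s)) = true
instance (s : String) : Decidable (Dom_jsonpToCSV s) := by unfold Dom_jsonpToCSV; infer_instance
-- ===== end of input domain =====

-- B replaces A's char-by-char ignore/printing state machine with split-based text
-- extraction (split on '>', keep each piece's prefix before '<', join the nonempty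
-- runs with leading commas): more idiomatic, and measured faster in CPython (the
-- per-character Python loop becomes C-level split/join).

-- ===== PORT A =====
-- the body of A's 'for c in s' loop, acting on the state (arr, ignore, printing)
def stepA : (List Char × Bool × Bool) → Char → (List Char × Bool × Bool)
  | (arr, ignore, printing), c =>
    if c = '<' then (arr, true, false)
    else if c = '>' then (arr, false, false)
    else if !ignore then
      (if !printing then arr ++ [',', c] else arr ++ [c], ignore, true)
    else (arr, ignore, printing)

def jsonpToCSV (s : String) : String :=
  let s1 := PySem.Str.replace s "," ""
  let s2 := PySem.Str.replace s1 "\\/" "/"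
  let s3 := PySem.Str.replace s2 "&amp" "&"
  let s4 := PySem.Str.replace s3 "&nbsp;" " "
  let s5 := PySem.Str.replace s4 "</tr>" "\n"
  let fin := s5.toList.foldl stepA ([], false, false)
  let output := String.ofList fin.1
  let o1 := PySem.Str.replace output "\n," "\n"
  let o2 := PySem.Str.replace o1 ",\n" "\n"
  let o3 := PySem.Str.replace o2 " ," " "
  let o4 := PySem.Str.replace o3 "&mdash;" ""
  match PySem.Str.pyGet? o4 0 with          -- output[0]: IndexError (= none) iff output = ""
  | some c => if c = ',' then PySem.Str.slice o4 (some 1) none else o4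
  | none => ""                               -- A raises here; excluded by Pre_jsonpToCSV

-- ===== PORT B =====
def jsonpToCSV_alt (s : String) : String :=
  let s5 := PySem.Str.replace (PySem.Str.replace (PySem.Str.replace (PySem.Str.replace
              (PySem.Str.replace s "," "") "\\/" "/") "&amp" "&") "&nbsp;" " ") "</tr>" "\n"
  -- runs = (seg.split('<')[0] for seg in s.split('>'))
  let runs := (PySem.Chars.splitOn s5.toList ['>']).map
                (fun seg => (PySem.Chars.splitOn seg ['<']).headD [])
  -- output = ''.join(',' + r for r in runs if r)
  let output := PySem.Str.join ""
                  ((runs.filter (fun r => r ≠ [])).map (fun r => String.ofList (',' :: r)))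
  let o4 := PySem.Str.replace (PySem.Str.replace (PySem.Str.replace (PySem.Str.replace
              output "\n," "\n") ",\n" "\n") " ," " ") "&mdash;" ""
  match PySem.Str.pyGet? o4 0 with
  | some c => if c = ',' then PySem.Str.slice o4 (some 1) none else o4
  | none => ""                               -- B's Python raises IndexError here too

-- ===== PRECONDITION & SPEC =====
-- the input after A's five initial replacements (used only to state Pre_)
def pvCleaned (s : String) : String :=
  PySem.Str.replace (PySem.Str.replace (PySem.Str.replace (PySem.Str.replace
    (PySem.Str.replace s "," "") "\\/" "/") "&amp" "&") "&nbsp;" " ") "</tr>" "\n"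

-- Pre_ excludes exactly the inputs on which A (and B alike) raise IndexError at
-- 'output[0]': those where, after the five replacements, no character lies outside
-- <...> tags, so the extracted text is empty.
def Pre_jsonpToCSV (s : String) : Prop :=
  ((PySem.Chars.splitOn (pvCleaned s).toList ['>']).any
     (fun seg => !(seg.takeWhile (fun c => c ≠ '<')).isEmpty)) = true

instance (s : String) : Decidable (Pre_jsonpToCSV s) := by unfold Pre_jsonpToCSV; infer_instance

def pvWitness_jsonpToCSV : String := "<tr><td>ok</td></tr>"

def Spec_jsonpToCSV (s : String) (out : String) : Prop := out = jsonpToCSV_alt s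
instance (s : String) (out : String) : Decidable (Spec_jsonpToCSV s out) := by unfold Spec_jsonpToCSV; infer_instance

-- ===== CLAIM (what is proved, stated in full; the proofs are below) =====
def Claim_equal_jsonpToCSV : Prop := ∀ (s : String), Dom_jsonpToCSV s → Pre_jsonpToCSV s → Spec_jsonpToCSV s (jsonpToCSV s)

-- ===== LEMMAS AND PROOFS =====

-- structural version of Python's s.split(sep) for a one-character separator
def mySplit (sep : Char) : List Char → List (List Char)
  | [] => [[]]
  | c :: t => if c = sep then [] :: mySplit sep t else (mySplit sep t).modifyHead (c :: ·)

-- the text of a segment up to its first '<'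
def runOf (seg : List Char) : List Char := seg.takeWhile (fun c => c ≠ '<')

-- joined CSV text contributed by a list of segments
def tailJoin : List (List Char) → List Char
  | [] => []
  | sg :: ss => (if runOf sg = [] then [] else ',' :: runOf sg) ++ tailJoin ss

-- emission form of A's loop: the characters appended from state (ign, pr) on
def emit : List Char → Bool → Bool → List Char
  | [], _, _ => []
  | c :: t, ign, pr =>
    if c = '<' then emit t true false
    else if c = '>' then emit t false false
    else if ign then emit t ign pr
    else (if pr then [c] else [',', c]) ++ emit t false true

-- head-segment form used while relating emit to mySplit
def hp (pr : Bool) (m : List (List Char)) : List Char :=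
  (if pr then runOf (m.headD [])
   else if runOf (m.headD []) = [] then [] else ',' :: runOf (m.headD [])) ++ tailJoin m.tail

theorem mySplit_ne_nil (sep : Char) (l : List Char) : mySplit sep l ≠ [] := by
  induction l with
  | nil => simp [mySplit]
  | cons c t ih =>
    simp only [mySplit]
    split
    · simp
    · obtain ⟨hd, tl, he⟩ := List.exists_cons_of_ne_nil ih
      simp [he]

theorem foldA_emit (l : List Char) : ∀ (arr : List Char) (ign pr : Bool),
    (l.foldl stepA (arr, ign, pr)).1 = arr ++ emit l ign pr := by
  induction l with
  | nil => intro arr ign pr; simp [emit]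
  | cons c t ih =>
    intro arr ign pr
    by_cases h1 : c = '<'
    · simp [List.foldl_cons, stepA, emit, h1, ih]
    · by_cases h2 : c = '>'
      · simp [List.foldl_cons, stepA, emit, h2, ih]
      · cases ign with
        | true => simp [List.foldl_cons, stepA, emit, h1, h2, ih]
        | false =>
          cases pr with
          | true => simp [List.foldl_cons, stepA, emit, h1, h2, ih]
          | false => simp [List.foldl_cons, stepA, emit, h1, h2, ih]

theorem splitOn_go_spec (sep : Char) : ∀ (fuel : Nat) (l cur : List Char) (acc : List (List Char)),
    l.length ≤ fuel →
    PySem.Chars.splitOn.go [sep] fuel l cur acc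
      = acc.reverse ++ (mySplit sep l).modifyHead (fun h => cur.reverse ++ h) := by
  intro fuel
  induction fuel with
  | zero =>
    intro l cur acc h
    have hl : l = [] := by cases l with | nil => rfl | cons a t => simp at h
    subst hl
    simp [PySem.Chars.splitOn.go, mySplit]
  | succ fuel ih =>
    intro l cur acc h
    cases l with
    | nil => simp [PySem.Chars.splitOn.go, mySplit]
    | cons c rest =>
      by_cases hc : c = sep
      · subst hc
        have hpre : List.isPrefixOf [c] (c :: rest) = true := by simp [List.isPrefixOf]
        simp only [PySem.Chars.splitOn.go, hpre, if_true, List.length_cons] at *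
        have hdrop : List.drop (List.length ([] : List Char) + 1) (c :: rest) = rest := rfl
        rw [hdrop, ih rest [] (cur.reverse :: acc) (by omega)]
        obtain ⟨hd, tl, he⟩ := List.exists_cons_of_ne_nil (mySplit_ne_nil c rest)
        simp [mySplit, he]
      · have hpre : List.isPrefixOf [sep] (c :: rest) = false := by
          simp [List.isPrefixOf]; exact fun hh => absurd hh.symm hc
        simp only [PySem.Chars.splitOn.go, hpre, Bool.false_eq_true, if_false]
        rw [ih rest (c :: cur) acc (by simpa using h)]
        obtain ⟨hd, tl, he⟩ := List.exists_cons_of_ne_nil (mySplit_ne_nil sep rest)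
        simp [mySplit, hc, he]

theorem splitOn_eq_mySplit (sep : Char) (l : List Char) :
    PySem.Chars.splitOn l [sep] = mySplit sep l := by
  unfold PySem.Chars.splitOn
  rw [splitOn_go_spec sep (l.length + 1) l [] [] (by omega)]
  obtain ⟨hd, tl, he⟩ := List.exists_cons_of_ne_nil (mySplit_ne_nil sep l)
  simp [he]

theorem headD_mySplit_lt (seg : List Char) : (mySplit '<' seg).headD [] = runOf seg := by
  induction seg with
  | nil => simp [mySplit, runOf]
  | cons c t ih =>
    by_cases hc : c = '<'
    · simp [mySplit, runOf, hc]
    · obtain ⟨hd, tl, he⟩ := List.exists_cons_of_ne_nil (mySplit_ne_nil '<' t)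
      have h2 : hd = runOf t := by simpa [he] using ih
      simp only [mySplit, hc, if_false, he, List.modifyHead_cons, List.headD_cons]
      rw [runOf, List.takeWhile_cons_of_pos (by simpa using hc), h2, runOf]

theorem hp_false (m : List (List Char)) (hm : m ≠ []) : hp false m = tailJoin m := by
  cases m with
  | nil => exact absurd rfl hm
  | cons a l => simp [hp, tailJoin]

theorem emit_mySplit (l : List Char) :
    (∀ pr, emit l false pr = hp pr (mySplit '>' l)) ∧
    (∀ pr, emit l true pr = tailJoin (mySplit '>' l).tail) := by
  induction l with
  | nil => constructor <;> intro pr <;> simp [emit, mySplit, hp, tailJoin, runOf]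
  | cons c t ih =>
    obtain ⟨Pt, Qt⟩ := ih
    by_cases h2 : c = '>'
    · subst h2
      constructor <;> intro pr
      · rw [show emit ('>' :: t) false pr = emit t false false by simp [emit]]
        rw [Pt false, hp_false _ (mySplit_ne_nil '>' t)]
        simp [mySplit, hp, runOf]
      · rw [show emit ('>' :: t) true pr = emit t false false by simp [emit]]
        rw [Pt false, hp_false _ (mySplit_ne_nil '>' t)]
        simp [mySplit]
    · obtain ⟨hd, tl, he⟩ := List.exists_cons_of_ne_nil (mySplit_ne_nil '>' t)
      by_cases h1 : c = '<'
      · subst h1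
        constructor <;> intro pr
        · rw [show emit ('<' :: t) false pr = emit t true false by simp [emit]]
          rw [Qt false]
          simp [mySplit, h2, he, hp, runOf]
        · rw [show emit ('<' :: t) true pr = emit t true false by simp [emit]]
          rw [Qt false]
          simp [mySplit, h2, he]
      · constructor <;> intro pr
        · rw [show emit (c :: t) false pr = (if pr then [c] else [',', c]) ++ emit t false true by
            simp [emit, h1, h2]]
          rw [Pt true]
          have hrun : runOf (c :: hd) = c :: runOf hd := by
            rw [runOf, List.takeWhile_cons_of_pos (by simpa using h1)]; rfl
          cases pr <;> simp [mySplit, h2, he, hp, hrun]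
        · rw [show emit (c :: t) true pr = emit t true pr by simp [emit, h1, h2]]
          rw [Qt pr]
          simp [mySplit, h2, he]

theorem joinNil : ∀ ps : List (List Char), PySem.Chars.join [] ps = ps.flatten
  | [] => by rw [PySem.Chars.join_nil]; rfl
  | [p] => by rw [PySem.Chars.join_singleton]; simp
  | p :: q :: r => by
    rw [PySem.Chars.join_cons_cons, joinNil (q :: r)]
    simp

theorem joinTail (segs : List (List Char)) :
    ((((segs.map runOf).filter (fun r => r ≠ [])).map (fun r => ',' :: r))).flatten
      = tailJoin segs := by
  induction segs with
  | nil => simp [tailJoin]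
  | cons sg ss ih =>
    rw [show tailJoin (sg :: ss)
          = (if runOf sg = [] then [] else ',' :: runOf sg) ++ tailJoin ss from rfl, ← ih]
    by_cases h : runOf sg = [] <;> simp [h]

theorem core_eq (l : List Char) :
    (l.foldl stepA ([], false, false)).1
      = PySem.Chars.join []
          ((((PySem.Chars.splitOn l ['>']).map
              (fun seg => (PySem.Chars.splitOn seg ['<']).headD [])).filter
                (fun r => r ≠ [])).map (fun r => ',' :: r)) := by
  rw [foldA_emit l [] false false, List.nil_append]
  rw [(emit_mySplit l).1 false, hp_false _ (mySplit_ne_nil '>' l)]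
  rw [joinNil, splitOn_eq_mySplit]
  have hmap : (mySplit '>' l).map (fun seg => (PySem.Chars.splitOn seg ['<']).headD [])
      = (mySplit '>' l).map runOf := by
    apply List.map_congr_left
    intro seg _
    rw [splitOn_eq_mySplit, headD_mySplit_lt]
  rw [hmap, joinTail]

theorem ports_eq (s : String) : jsonpToCSV s = jsonpToCSV_alt s := by
  unfold jsonpToCSV jsonpToCSV_alt
  simp only []
  generalize (PySem.Str.replace (PySem.Str.replace (PySem.Str.replace (PySem.Str.replace
      (PySem.Str.replace s "," "") "\\/" "/") "&amp" "&") "&nbsp;" " ") "</tr>" "\n") = w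
  have h : String.ofList ((w.toList.foldl stepA ([], false, false)).1)
      = PySem.Str.join ""
          ((((PySem.Chars.splitOn w.toList ['>']).map
                (fun seg => (PySem.Chars.splitOn seg ['<']).headD [])).filter
                  (fun r => r ≠ [])).map (fun r => String.ofList (',' :: r))) := by
    unfold PySem.Str.join
    congr 1
    rw [core_eq]
    congr 1
    simp [List.map_map, Function.comp]
  rw [h]

-- ===== VERDICT (by name: the statement is the Claim_ definition above) =====
theorem jsonpToCSV_spec : Claim_equal_jsonpToCSV := by
  intro s _ _
  unfold Spec_jsonpToCSV
  exact ports_eq s
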